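-- pv_equiv track=rewrite | github.com/wiiiiiiitung/service_ppt | slide_planner.py | _group_anthem_verses
-- ===== SOURCE A (Python) =====
-- def _group_anthem_verses(verses, max_lines=6):
--     """
--     Pack verses into slide-sized chunks of exactly max_lines lines.
--
--     Flattens paragraph boundaries — splits across paragraphs when needed
--     so each slide gets a full max_lines count (last slide may have fewer).
--     """
--     all_lines = []
--     for v in verses:
--         all_lines.extend(v.split("\n"))
--
--     groups = []
--     for i in range(0, len(all_lines), max_lines):
--         groups.append("\n".join(all_lines[i:i + max_lines]))
--     return groups
-- ===== SOURCE B (Python) =====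
-- def _group_anthem_verses(verses, max_lines=6):
--     groups = []
--     current = []
--     for v in verses:
--         for line in v.split("\n"):
--             current.append(line)
--             if len(current) == max_lines:
--                 groups.append("\n".join(current))
--                 current = []
--     if current:
--         groups.append("\n".join(current))
--     return groups
-- ===== Notes on version B (the rewrite author's own statement) =====
-- stated objective: alternative
-- what changed: B streams lines into a running buffer that is flushed each time it reaches max_lines, instead of materializing the full flattened line list and slicing it by index ranges.
-- outside the precondition, e.g. on _group_anthem_verses(['a\nb'], -1): A returns [], B returns ['a\nb']; on _group_anthem_verses(['a\nb'], 0): A raises ValueError, B returns ['a\nb']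
import Mathlib
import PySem

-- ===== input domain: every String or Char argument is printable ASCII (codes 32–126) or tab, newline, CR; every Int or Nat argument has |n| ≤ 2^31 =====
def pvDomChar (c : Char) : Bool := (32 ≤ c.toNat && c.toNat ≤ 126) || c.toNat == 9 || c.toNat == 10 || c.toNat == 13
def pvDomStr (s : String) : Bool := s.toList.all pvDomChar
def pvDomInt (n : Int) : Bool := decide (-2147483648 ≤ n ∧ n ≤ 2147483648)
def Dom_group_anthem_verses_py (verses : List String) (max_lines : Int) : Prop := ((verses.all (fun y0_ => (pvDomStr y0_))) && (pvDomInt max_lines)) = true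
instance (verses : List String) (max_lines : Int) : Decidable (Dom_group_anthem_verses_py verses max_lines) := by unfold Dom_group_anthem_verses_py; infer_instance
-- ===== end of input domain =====

-- B replaces A's flatten-then-slice-by-range pass with a single streaming pass over the lines
-- using a running buffer flushed at max_lines (alternative decomposition, same cost).


-- ===== PORT A =====
-- v.split("\n"): sep is the non-empty literal "\n", so split? never returns none
def pvSplitNL (v : String) : List String := (PySem.Str.split? v "\n").getD []

def group_anthem_verses_py (verses : List String) (max_lines : Int) : List String :=
  let all_lines := verses.foldl (fun acc v => acc ++ pvSplitNL v) []
  (PySem.List.pyRange 0 (all_lines.length : Int) max_lines).foldl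
    (fun groups i =>
      groups ++ [PySem.Str.join "\n" (PySem.List.slice all_lines (some i) (some (i + max_lines)))]) []

-- ===== PORT B =====
def group_anthem_verses_py_alt (verses : List String) (max_lines : Int) : List String :=
  let st := verses.foldl
    (fun (st : List String × List String) v =>
      (pvSplitNL v).foldl
        (fun (st : List String × List String) line =>
          let cur := st.2 ++ [line]
          if (cur.length : Int) = max_lines then (st.1 ++ [PySem.Str.join "\n" cur], [])
          else (st.1, cur))
        st)
    ([], [])
  if st.2.isEmpty then st.1 else st.1 ++ [PySem.Str.join "\n" st.2]

-- ===== PRECONDITION & SPEC =====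
-- Pre_ excludes non-positive max_lines, a corner no caller specifies: there A raises ValueError
-- (a zero range() step) or returns an empty result for a negative step as an artefact of range(),
-- while B's streaming pass returns all lines as one group; both corner values are defensible.
def Pre_group_anthem_verses_py (verses : List String) (max_lines : Int) : Prop := 1 ≤ max_lines
instance (verses : List String) (max_lines : Int) : Decidable (Pre_group_anthem_verses_py verses max_lines) := by unfold Pre_group_anthem_verses_py; infer_instance

def pvWitness_group_anthem_verses_py : List String × Int := (["line1\nline2\nline3", "line4"], 2)

def Spec_group_anthem_verses_py (verses : List String) (max_lines : Int) (out : List String) : Prop := out = group_anthem_verses_py_alt verses max_lines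
instance (verses : List String) (max_lines : Int) (out : List String) : Decidable (Spec_group_anthem_verses_py verses max_lines out) := by unfold Spec_group_anthem_verses_py; infer_instance

-- ===== CLAIM (what is proved, stated in full; the proofs are below) =====
def Claim_equal_group_anthem_verses_py : Prop := ∀ (verses : List String) (max_lines : Int), Dom_group_anthem_verses_py verses max_lines → Pre_group_anthem_verses_py verses max_lines → Spec_group_anthem_verses_py verses max_lines (group_anthem_verses_py verses max_lines)


-- ===== LEMMAS AND PROOFS =====

-- chunks of size n+1 (the common shape both programs compute)
def pvChunks (n : Nat) (L : List String) : List (List String) :=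
  match L with
  | [] => []
  | x :: t => (x :: t).take (n + 1) :: pvChunks n ((x :: t).drop (n + 1))
termination_by L.length
decreasing_by simp

theorem pvChunks_nil (n : Nat) : pvChunks n [] = [] := by rw [pvChunks.eq_def]

theorem pvChunks_cons (n : Nat) (x : String) (t : List String) :
    pvChunks n (x :: t) = (x :: t).take (n + 1) :: pvChunks n ((x :: t).drop (n + 1)) := by
  rw [pvChunks.eq_def]

-- short chunk: a nonempty list shorter than the chunk size is a single chunk
theorem pvChunks_short (n : Nat) (L : List String) (h0 : L ≠ []) (h : L.length ≤ n + 1) :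
    pvChunks n L = [L] := by
  cases L with
  | nil => exact absurd rfl h0
  | cons x t =>
    rw [pvChunks_cons, List.take_of_length_le h, List.drop_of_length_le h, pvChunks_nil]

-- full chunk at the front
theorem pvChunks_full (n : Nat) (c L : List String) (hc : c.length = n + 1) :
    pvChunks n (c ++ L) = c :: pvChunks n L := by
  have hcne : c ≠ [] := by
    intro h; rw [h] at hc; simp at hc
  rw [pvChunks.eq_def]
  split
  · next hE => exact absurd (List.append_eq_nil_iff.mp hE).1 hcne
  · next y s hE =>
    rw [← hE]
    rw [List.take_append_of_le_length (by omega), List.take_of_length_le (by omega),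
        List.drop_append_of_le_length (by omega), List.drop_of_length_le (by omega)]
    simp

-- A's range-of-slices is pvChunks (index arithmetic, all on Nat after slice_natCast_add)
theorem pv_range_chunks (N : Nat) (hN : 1 ≤ N) :
    ∀ (cnt : Nat) (L : List String), L.length ≤ N * cnt → N * cnt < L.length + N →
    (List.range cnt).map (fun k => (L.drop (N * k)).take N) = pvChunks (N - 1) L := by
  intro cnt
  induction cnt with
  | zero =>
    intro L h1 h2
    have : L = [] := by
      cases L with
      | nil => rfl
      | cons x t => simp at h1
    subst this; simp [pvChunks_nil]
  | succ c ih =>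
    intro L h1 h2
    have hLne : L ≠ [] := by
      intro h; subst h
      simp at h2
      have : N * c + N < N := by
        calc N * c + N = N * (c + 1) := by ring
        _ < N := h2
      omega
    have hNc : N * (c + 1) = N * c + N := by ring
    rw [List.range_succ_eq_map]
    simp only [List.map_cons, List.map_map]
    have hhead : (L.drop (N * 0)).take N = L.take (N - 1 + 1) := by
      simp [Nat.sub_add_cancel hN]
    have htail : ∀ k, (L.drop (N * (k + 1))).take N = ((L.drop N).drop (N * k)).take N := by
      intro k
      rw [List.drop_drop]
      congr 1
      rw [Nat.mul_succ, Nat.add_comm]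
    have hrec : (List.range c).map ((fun k => (L.drop (N * k)).take N) ∘ (fun i => i + 1))
        = pvChunks (N - 1) (L.drop N) := by
      rw [show ((fun k => (L.drop (N * k)).take N) ∘ (fun i => i + 1))
            = fun k => ((L.drop N).drop (N * k)).take N from funext fun k => htail k]
      apply ih
      · have := h1
        have h' : L.length - N ≤ N * c := by
          generalize hq : N * c = q at *
          omega
        simpa using h'
      · by_cases hLN : N ≤ L.length
        · have : (L.drop N).length = L.length - N := by simp
          rw [this]
          generalize hq : N * c = q at *
          omega
        · have hc0 : c = 0 := by
            by_contra hc
            have h1c : 1 ≤ c := by omega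
            have : N ≤ N * c := Nat.le_mul_of_pos_right N (by omega)
            omega
          subst hc0
          simp
          omega
    cases L with
    | nil => exact absurd rfl hLne
    | cons x t =>
      have hs : N - 1 + 1 = N := Nat.sub_add_cancel hN
      rw [pvChunks_cons, hs]
      refine List.cons_eq_cons.mpr ⟨?_, ?_⟩
      · simp
      · simpa [Function.comp, Nat.succ_eq_add_one] using hrec
-- the step function of B's inner loop, abstracted over the chunk size N (max_lines = N)
def pvStep (N : Nat) (st : List String × List String) (line : String) : List String × List String :=
  let cur := st.2 ++ [line]
  if (cur.length : Int) = (N : Int) then (st.1 ++ [PySem.Str.join "\n" cur], [])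
  else (st.1, cur)

def pvFlush (st : List String × List String) : List String :=
  if st.2.isEmpty then st.1 else st.1 ++ [PySem.Str.join "\n" st.2]

-- invariant of B's streaming loop: flushing the fold equals chunking the buffer plus the rest
theorem pv_loop (N : Nat) (hN : 1 ≤ N) :
    ∀ (L : List String) (g c : List String), c.length < N →
    pvFlush (L.foldl (pvStep N) (g, c))
      = g ++ (pvChunks (N - 1) (c ++ L)).map (PySem.Str.join "\n") := by
  intro L
  induction L with
  | nil =>
    intro g c hc
    by_cases hcE : c = []
    · subst hcE; simp [pvFlush, pvChunks_nil]
    · have : pvChunks (N - 1) (c ++ []) = [c] := by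
        rw [List.append_nil]
        exact pvChunks_short _ _ hcE (by omega)
      rw [this]
      simp [pvFlush, List.isEmpty_iff, hcE]
  | cons x t ih =>
    intro g c hc
    rw [List.foldl_cons]
    by_cases hfull : c.length + 1 = N
    · have hstep : pvStep N (g, c) x = (g ++ [PySem.Str.join "\n" (c ++ [x])], []) := by
        simp only [pvStep]
        rw [if_pos (by simp; omega)]
      rw [hstep, ih _ [] (by simp; omega)]
      have : pvChunks (N - 1) (c ++ x :: t) = (c ++ [x]) :: pvChunks (N - 1) t := by
        have : c ++ x :: t = (c ++ [x]) ++ t := by simp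
        rw [this]
        exact pvChunks_full _ _ _ (by simp; omega)
      rw [this]
      simp
    · have hstep : pvStep N (g, c) x = (g, c ++ [x]) := by
        simp only [pvStep]
        rw [if_neg (by simp; omega)]
      rw [hstep, ih _ (c ++ [x]) (by simp; omega)]
      congr 2
      simp

-- ceiling-count bounds for range(0, b, m): cnt = ((b + m - 1) / m) with 0 < m
theorem pv_cnt_bounds (b m : Int) (hm : 1 ≤ m) :
    b ≤ m * ((b + m - 1) / m) ∧ m * ((b + m - 1) / m) < b + m := by
  have h1 := Int.mul_ediv_add_emod (b + m - 1) m
  have h2 := Int.emod_nonneg (b + m - 1) (by omega : m ≠ 0)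
  have h3 := Int.emod_lt_of_pos (b + m - 1) (by omega : 0 < m)
  generalize hq : (b + m - 1) / m = q at *
  generalize hr : (b + m - 1) % m = r at *
  generalize hP : m * q = P at *
  omega

-- ===== VERDICT (by name: the statement is the Claim_ definition above) =====
theorem group_anthem_verses_py_spec : Claim_equal_group_anthem_verses_py := by
  intro verses m _ hpre
  unfold Spec_group_anthem_verses_py
  unfold Pre_group_anthem_verses_py at hpre
  set N : Nat := m.toNat with hNdef
  have hmN : m = (N : Int) := by omega
  have hN1 : 1 ≤ N := by omega
  clear_value N
  set L : List String := verses.flatMap pvSplitNL with hL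
  clear_value L
  -- B side
  have hB : group_anthem_verses_py_alt verses m
      = (pvChunks (N - 1) L).map (PySem.Str.join "\n") := by
    unfold group_anthem_verses_py_alt
    have houter : verses.foldl
        (fun (st : List String × List String) v =>
          (pvSplitNL v).foldl
            (fun (st : List String × List String) line =>
              let cur := st.2 ++ [line]
              if (cur.length : Int) = m then (st.1 ++ [PySem.Str.join "\n" cur], [])
              else (st.1, cur))
            st)
        ([], [])
        = L.foldl (pvStep N) ([], []) := by
      rw [hL, List.foldl_flatMap]
      simp only [hmN]
      rfl
    simp only [houter]
    have h := pv_loop N hN1 L [] [] (by simp; omega)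
    simp only [List.nil_append] at h
    unfold pvFlush at h
    exact h
  -- A side
  have hA : group_anthem_verses_py verses m
      = (pvChunks (N - 1) L).map (PySem.Str.join "\n") := by
    unfold group_anthem_verses_py
    have hflat : verses.foldl (fun acc v => acc ++ pvSplitNL v) ([] : List String) = L := by
      rw [PySem.List.foldl_append_eq_flatMap, List.nil_append, hL]
    simp only [hflat]
    rw [PySem.List.foldl_append_singleton_eq_map, List.nil_append]
    rw [PySem.List.pyRange_of_pos 0 (L.length : Int) (by omega : (0:Int) < m)]
    rw [List.map_map]
    simp only [sub_zero, zero_add]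
    by_cases hLnil : L = []
    · subst hLnil
      simp only [List.length_nil, Nat.cast_zero]
      rw [if_neg (by omega)]
      simp [pvChunks_nil]
    · have hLpos : 0 < L.length := List.length_pos_iff.mpr hLnil
      rw [if_pos (by omega)]
      set cntI : Int := ((L.length : Int) + m - 1) / m with hcnt
      have hbounds := pv_cnt_bounds (L.length : Int) m hpre
      rw [← hcnt] at hbounds
      clear_value cntI
      have hcntNN : 0 ≤ cntI := by
        rw [hcnt]
        apply Int.ediv_nonneg <;> omega
      have hcast : ((N * cntI.toNat : Nat) : Int) = m * cntI := by
        push_cast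
        rw [Int.toNat_of_nonneg hcntNN, ← hmN]
      have c1 : L.length ≤ N * cntI.toNat := by
        have hb := hbounds.1
        omega
      have c2 : N * cntI.toNat < L.length + N := by
        have hb := hbounds.2
        omega
      have hmain := pv_range_chunks N hN1 cntI.toNat L c1 c2
      calc (List.range cntI.toNat).map
            ((fun i => PySem.Str.join "\n" (PySem.List.slice L (some i) (some (i + m)))) ∘
              (fun k : Nat => m * (k : Int)))
          = (List.range cntI.toNat).map
            ((PySem.Str.join "\n") ∘ (fun k => (L.drop (N * k)).take N)) := by
            apply List.map_congr_left
            intro k _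
            simp only [Function.comp]
            congr 1
            have h1 : m * (k : Int) = ((N * k : Nat) : Int) := by push_cast [hmN]; ring
            have h2 : m * (k : Int) + m = ((N * k : Nat) : Int) + ((N : Nat) : Int) := by
              push_cast [hmN]; ring
            rw [h2, h1]
            exact PySem.List.slice_natCast_add L (N * k) N
        _ = (pvChunks (N - 1) L).map (PySem.Str.join "\n") := by
            rw [← List.map_map, hmain]
  rw [hA, hB]
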